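-- pv_equiv track=rewrite | github.com/sandeepkumar8713/pythonapps | 02_string/28_minimum_repeation_for_substring.py | minRepetation
-- ===== SOURCE A (Python) =====
-- def minRepetation(A, B):
--     ans = 1
--     S = A
--     while len(S) < len(B):
--         S += A
--         ans +=1
--
--     if B in S:
--         return ans
--
--     if B in (S+A):
--         return ans + 1
--
--     return -1
-- ===== SOURCE B (Python) =====
-- def minRepetation(A, B):
--     # Match B against A read cyclically at each start offset; no repeated string is ever built.
--     # The needed repeat count max(1, ceil((i+m)/n)) is nondecreasing in the offset i,
--     # so the first matching offset gives the minimal count.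
--     n = len(A)
--     m = len(B)
--     for i in range(n):
--         if all(B[j] == A[(i + j) % n] for j in range(m)):
--             return max(1, -(-(i + m) // n))
--     return -1
-- ===== Notes on version B (the rewrite author's own statement) =====
-- stated objective: alternative
-- what changed: B never builds any repeated string and does no substring search: it scans start offsets i in A, matches B character-by-character against A read cyclically ((i+j) mod len(A)), and returns max(1, ceil((i+len(B))/len(A))) for the first matching offset (valid since that count is nondecreasing in i), else -1.
-- outside the precondition, e.g. on minRepetation('', ''): A returns 1, B returns -1
import Mathlib
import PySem

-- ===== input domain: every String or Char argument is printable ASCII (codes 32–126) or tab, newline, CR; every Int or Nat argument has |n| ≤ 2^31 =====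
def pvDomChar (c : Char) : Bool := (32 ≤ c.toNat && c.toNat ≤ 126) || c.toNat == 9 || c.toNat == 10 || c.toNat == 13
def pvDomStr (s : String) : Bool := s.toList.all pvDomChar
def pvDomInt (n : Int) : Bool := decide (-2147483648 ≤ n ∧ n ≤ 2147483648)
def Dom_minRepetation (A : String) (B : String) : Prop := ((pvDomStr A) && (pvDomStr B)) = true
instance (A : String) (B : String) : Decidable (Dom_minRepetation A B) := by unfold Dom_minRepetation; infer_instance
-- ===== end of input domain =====

-- B tries each start offset i in A, matches B against A read cyclically with modular indexing
-- (building no repeated string and doing no substring search) and derives the repeat count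
-- from the match offset (objective: alternative algorithm).
-- ===== PORT A =====
-- while len(S) < len(B): S += A; ans += 1   (the 'hA : Al ≠ []' test is only a totality guard: Python loops forever there)
def minRepLoopA (Al Bl S : List Char) (ans : Int) : List Char × Int :=
  if h : S.length < Bl.length then
    if hA : Al ≠ [] then minRepLoopA Al Bl (S ++ Al) (ans + 1) else (S, ans)
  else (S, ans)
termination_by Bl.length - S.length
decreasing_by
  simp only [List.length_append]
  have : 0 < Al.length := List.length_pos_iff.mpr hA
  omega

def minRepetation (A : String) (B : String) : Int :=
  let Al := A.toList
  let Bl := B.toList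
  let r := minRepLoopA Al Bl Al 1
  if PySem.Chars.isIn Bl r.1 then r.2
  else if PySem.Chars.isIn Bl (r.1 ++ Al) then r.2 + 1
  else -1

-- ===== PORT B =====
-- all(B[j] == A[(i + j) % n] for j in range(m))
def pvMatch (Al Bl : List Char) (i : Nat) : Bool :=
  (List.range Bl.length).all (fun j => Bl.getD j ' ' == Al.getD ((i + j) % Al.length) ' ')

-- k = max(1, -(-(i + m) // n))
def pvK (Al Bl : List Char) (i : Nat) : Int :=
  max 1 (-(PySem.Int.floordiv (-((i : Int) + (Bl.length : Int))) ((Al.length : Int))))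

-- for i in range(n): if <match>: return k   — first matching offset, else -1
def minRepetation_alt (A : String) (B : String) : Int :=
  let Al := A.toList
  let Bl := B.toList
  match (List.range Al.length).find? (pvMatch Al Bl) with
  | some i => pvK Al Bl i
  | none => -1

-- ===== PRECONDITION & SPEC =====
-- Pre_ excludes A = "": there Python A loops forever when B is non-empty, and on the degenerate
-- pair ("", "") A returns the accidental 1 while B's offset loop is empty and yields -1.
def Pre_minRepetation (A : String) (B : String) : Prop := A ≠ ""
instance (A : String) (B : String) : Decidable (Pre_minRepetation A B) := by unfold Pre_minRepetation; infer_instance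
def pvWitness_minRepetation : String × String := ("ab", "abab")
def Spec_minRepetation (A : String) (B : String) (out : Int) : Prop := out = minRepetation_alt A B
instance (A : String) (B : String) (out : Int) : Decidable (Spec_minRepetation A B out) := by unfold Spec_minRepetation; infer_instance

-- ===== CLAIM (what is proved, stated in full; the proofs are below) =====
def Claim_equal_minRepetation : Prop := ∀ (A : String) (B : String), Dom_minRepetation A B → Pre_minRepetation A B → Spec_minRepetation A B (minRepetation A B)

-- ===== LEMMAS AND PROOFS =====

theorem length_pyRepeat {α : Type} (xs : List α) (n : Int) :
    (PySem.List.pyRepeat xs n).length = n.toNat * xs.length := by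
  simp [PySem.List.pyRepeat]

theorem pyRepeat_succ {α : Type} (xs : List α) (n : Int) (hn : 0 ≤ n) :
    PySem.List.pyRepeat xs (n + 1) = PySem.List.pyRepeat xs n ++ xs := by
  have : (n + 1).toNat = n.toNat + 1 := by omega
  simp [PySem.List.pyRepeat, this, List.replicate_succ']

-- the loop's value: starting from S = A^ans it ends at (A^k, k), k = max ans ceil(|B|/|A|)
theorem minRepLoopA_eq (Al Bl : List Char) (hA : Al ≠ []) (ans : Int) (hans : 1 ≤ ans) :
    minRepLoopA Al Bl (PySem.List.pyRepeat Al ans) ans =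
        (PySem.List.pyRepeat Al (max ans (-(PySem.Int.floordiv (-(Bl.length : Int)) (Al.length : Int)))),
         max ans (-(PySem.Int.floordiv (-(Bl.length : Int)) (Al.length : Int)))) := by
  have hpos : (0 : Int) < (Al.length : Int) := by
    have := List.length_pos_iff.mpr hA
    exact_mod_cast this
  set c : Int := -(PySem.Int.floordiv (-(Bl.length : Int)) (Al.length : Int)) with hc
  by_cases hlt : (PySem.List.pyRepeat Al ans).length < Bl.length
  · have hlen : (PySem.List.pyRepeat Al ans).length = ans.toNat * Al.length := length_pyRepeat _ _
    have hmul : ans * (Al.length : Int) < (Bl.length : Int) := by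
      have : ((ans.toNat * Al.length : Nat) : Int) < (Bl.length : Int) := by
        rw [← hlen]; exact_mod_cast hlt
      push_cast at this
      have hto : (ans.toNat : Int) = ans := by omega
      rw [hto] at this; exact this
    have hcc : ans + 1 ≤ c := by
      have : PySem.Int.floordiv (-(Bl.length : Int)) (Al.length : Int) < -ans := by
        rw [PySem.Int.floordiv_lt_iff_lt_mul hpos]; nlinarith
      omega
    have hmax : max ans c = max (ans + 1) c := by omega
    rw [minRepLoopA]
    simp only [hlt, hA, dif_pos, ne_eq, not_false_eq_true]
    rw [← pyRepeat_succ Al ans (by omega)]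
    rw [minRepLoopA_eq Al Bl hA (ans + 1) (by omega), hmax]
  · have hlen : (PySem.List.pyRepeat Al ans).length = ans.toNat * Al.length := length_pyRepeat _ _
    have hmul : (Bl.length : Int) ≤ ans * (Al.length : Int) := by
      have : (Bl.length : Int) ≤ ((ans.toNat * Al.length : Nat) : Int) := by
        rw [← hlen]; exact_mod_cast Nat.le_of_not_lt hlt
      push_cast at this
      have hto : (ans.toNat : Int) = ans := by omega
      rw [hto] at this; exact this
    have hcc : c ≤ ans := by
      have : -ans ≤ PySem.Int.floordiv (-(Bl.length : Int)) (Al.length : Int) := by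
        rw [PySem.Int.le_floordiv_iff_mul_le hpos]; nlinarith
      omega
    have hmax : max ans c = ans := by omega
    rw [minRepLoopA]
    simp only [hlt, dif_neg, not_false_eq_true, hmax]
termination_by Bl.length - (PySem.List.pyRepeat Al ans).length
decreasing_by
  simp only [length_pyRepeat] at hlt ⊢
  have h2 : (ans + 1).toNat = ans.toNat + 1 := by omega
  rw [h2, Nat.succ_mul]
  omega

theorem len_flat_rep (Al : List Char) (k : Nat) :
    ((List.replicate k Al).flatten).length = k * Al.length := by
  induction k with
  | zero => simp
  | succ k ih => rw [List.replicate_succ, List.flatten_cons, List.length_append, ih]; ring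

-- elements of A^k by modular indexing
theorem getD_flatten_replicate (Al : List Char) (k x : Nat) (hx : x < k * Al.length) :
    ((List.replicate k Al).flatten).getD x ' ' = Al.getD (x % Al.length) ' ' := by
  induction k with
  | zero => omega
  | succ k ih =>
    have hx' : x < k * Al.length + Al.length := by simpa [Nat.succ_mul] using hx
    rw [List.replicate_succ', List.flatten_append]
    simp only [List.flatten_cons, List.flatten_nil, List.append_nil]
    by_cases h : x < k * Al.length
    · rw [List.getD_append _ _ _ _ (by rw [len_flat_rep]; exact h)]
      exact ih h
    · have hn : 0 < Al.length := by omega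
      rw [List.getD_append_right _ _ _ _ (by rw [len_flat_rep]; omega)]
      rw [len_flat_rep]
      congr 1
      have h2 : x / Al.length = k := Nat.div_eq_of_lt_le (by omega) (by omega)
      have h3 : x % Al.length + k * Al.length = x := by
        have h4 := Nat.mod_add_div' x Al.length
        rw [h2] at h4; exact h4
      exact Nat.sub_eq_of_eq_add h3.symm

-- pvMatch unfolded
theorem pvMatch_iff (Al Bl : List Char) (i : Nat) :
    pvMatch Al Bl i = true ↔ ∀ j < Bl.length, Bl.getD j ' ' = Al.getD ((i + j) % Al.length) ' ' := by
  simp [pvMatch, List.all_eq_true, List.mem_range]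

-- infix by positions
theorem infix_iff_exists_pos (Bl L : List Char) :
    Bl <:+: L ↔ ∃ p, p + Bl.length ≤ L.length ∧ ∀ j < Bl.length, Bl.getD j ' ' = L.getD (p + j) ' ' := by
  constructor
  · rintro ⟨s, t, rfl⟩
    refine ⟨s.length, by simp, fun j hj => ?_⟩
    rw [List.append_assoc]
    rw [List.getD_append_right _ _ _ _ (by omega)]
    simp only [Nat.add_sub_cancel_left]
    rw [List.getD_append _ _ _ _ hj]
  · rintro ⟨p, hlen, hch⟩
    have hBl : Bl = (L.drop p).take Bl.length := by
      apply List.ext_getElem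
      · rw [List.length_take, List.length_drop]; omega
      · intro j h1 h2
        have hj : j < Bl.length := h1
        have := hch j hj
        rw [List.getD_eq_getElem _ _ hj] at this
        rw [List.getD_eq_getElem _ _ (by omega)] at this
        rw [this]
        simp [List.getElem_take, List.getElem_drop]
    rw [hBl]
    exact ((List.take_prefix _ _).isInfix).trans (List.drop_suffix p L).isInfix

theorem pyRepeat_toNat (Al : List Char) (c : Int) :
    PySem.List.pyRepeat Al c = (List.replicate c.toNat Al).flatten := by
  simp [PySem.List.pyRepeat]

-- floordiv is monotone in the numerator (positive divisor)
theorem floordiv_mono_num {x y n : Int} (hn : 0 < n) (h : x ≤ y) :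
    PySem.Int.floordiv x n ≤ PySem.Int.floordiv y n := by
  rw [PySem.Int.le_floordiv_iff_mul_le hn]
  have := (PySem.Int.le_floordiv_iff_mul_le hn (q := PySem.Int.floordiv x n) (a := x)).mp le_rfl
  linarith

-- bridge: B in A*k  ↔  some offset i < |A| matches cyclically and i + |B| ≤ k|A|
theorem isIn_pyRepeat_iff (Al Bl : List Char) (hA : Al ≠ []) (c : Int) (hc : 1 ≤ c) :
    PySem.Chars.isIn Bl (PySem.List.pyRepeat Al c) = true ↔
      ∃ i < Al.length, pvMatch Al Bl i = true ∧ (i : Int) + (Bl.length : Int) ≤ c * (Al.length : Int) := by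
  have hn : 0 < Al.length := List.length_pos_iff.mpr hA
  have hK : ((c.toNat : Int)) = c := by omega
  have hcast : ((c.toNat * Al.length : Nat) : Int) = c * (Al.length : Int) := by push_cast; rw [hK]
  rw [PySem.Chars.isIn_iff_infix, pyRepeat_toNat, infix_iff_exists_pos]
  constructor
  · rintro ⟨p, hlen, hch⟩
    rw [len_flat_rep] at hlen
    refine ⟨p % Al.length, Nat.mod_lt _ hn, ?_, ?_⟩
    · rw [pvMatch_iff]
      intro j hj
      rw [Nat.mod_add_mod]
      rw [hch j hj, getD_flatten_replicate _ _ _ (by omega)]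
    · have h1 : p % Al.length + Bl.length ≤ c.toNat * Al.length := by
        have := Nat.mod_le p Al.length; omega
      calc ((p % Al.length : Nat) : Int) + (Bl.length : Int)
          = ((p % Al.length + Bl.length : Nat) : Int) := by push_cast; ring
        _ ≤ ((c.toNat * Al.length : Nat) : Int) := by exact_mod_cast h1
        _ = c * (Al.length : Int) := hcast
  · rintro ⟨i, hi, hm, hle⟩
    have hle' : i + Bl.length ≤ c.toNat * Al.length := by
      have : ((i + Bl.length : Nat) : Int) ≤ ((c.toNat * Al.length : Nat) : Int) := by
        rw [hcast]; push_cast; exact_mod_cast hle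
      exact_mod_cast this
    rw [pvMatch_iff] at hm
    refine ⟨i, by rw [len_flat_rep]; omega, fun j hj => ?_⟩
    rw [hm j hj, getD_flatten_replicate _ _ _ (by omega)]

-- pvK bracket: pvK i ≤ c ↔ i + m ≤ c n  (c ≥ 1, n ≥ 1)
theorem pvK_le_iff (Al Bl : List Char) (hA : Al ≠ []) (i : Nat) (c : Int) (hc : 1 ≤ c) :
    pvK Al Bl i ≤ c ↔ (i : Int) + (Bl.length : Int) ≤ c * (Al.length : Int) := by
  have hn : (0 : Int) < (Al.length : Int) := by
    exact_mod_cast List.length_pos_iff.mpr hA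
  unfold pvK
  rw [max_le_iff]
  have hb := PySem.Int.le_floordiv_iff_mul_le (a := -((i : Int) + (Bl.length : Int))) (b := (Al.length : Int)) (q := -c) hn
  constructor
  · rintro ⟨-, h⟩
    have h2 : -c ≤ PySem.Int.floordiv (-((i : Int) + (Bl.length : Int))) ((Al.length : Int)) := by linarith
    have := hb.mp h2
    nlinarith
  · intro h
    refine ⟨hc, ?_⟩
    have h2 : -c * (Al.length : Int) ≤ -((i : Int) + (Bl.length : Int)) := by nlinarith
    have := hb.mpr h2
    linarith

-- pvK monotone in i
theorem pvK_mono (Al Bl : List Char) (hA : Al ≠ []) {i i' : Nat} (h : i ≤ i') :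
    pvK Al Bl i ≤ pvK Al Bl i' := by
  have hn : (0 : Int) < (Al.length : Int) := by
    exact_mod_cast List.length_pos_iff.mpr hA
  unfold pvK
  have := floordiv_mono_num (x := -((i' : Int) + (Bl.length : Int))) (y := -((i : Int) + (Bl.length : Int))) hn (by omega)
  omega

-- the scan yields none iff nothing matches, else the FIRST matching offset
theorem find_characterization (Al Bl : List Char) (N : Nat) :
    ((List.range N).find? (pvMatch Al Bl) = none ∧ ∀ i < N, pvMatch Al Bl i = false) ∨
    (∃ i < N, pvMatch Al Bl i = true ∧
        (List.range N).find? (pvMatch Al Bl) = some i ∧ ∀ j < i, pvMatch Al Bl j = false) := by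
  induction N with
  | zero => left; exact ⟨rfl, fun i hi => absurd hi (Nat.not_lt_zero i)⟩
  | succ N ih =>
    rw [List.range_succ, List.find?_append]
    rcases ih with ⟨hF, hnone⟩ | ⟨i, hiN, hm, hF, hmin⟩
    · rw [hF]
      cases hm : pvMatch Al Bl N with
      | false =>
        left
        refine ⟨by simp [hm], fun i hi => ?_⟩
        rcases Nat.lt_succ_iff_lt_or_eq.mp hi with h | h
        · exact hnone i h
        · rw [h]; exact hm
      | true =>
        right
        exact ⟨N, Nat.lt_succ_self N, hm, by simp [hm], hnone⟩
    · right
      exact ⟨i, Nat.lt_succ_of_lt hiN, hm, by rw [hF]; rfl, hmin⟩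

-- ===== VERDICT (by name: the statement is the Claim_ definition above) =====
theorem minRepetation_spec : Claim_equal_minRepetation := by
  intro A B _ hpre
  have hA : A.toList ≠ [] := by
    intro h
    apply hpre
    have := congrArg String.ofList h
    simpa using this
  have hn : (0 : Int) < (A.toList.length : Int) := by
    exact_mod_cast List.length_pos_iff.mpr hA
  unfold Spec_minRepetation minRepetation minRepetation_alt
  have h1 : PySem.List.pyRepeat A.toList (1 : Int) = A.toList := by
    simp [PySem.List.pyRepeat]
  have hloop := minRepLoopA_eq A.toList B.toList hA 1 (le_refl 1)
  rw [h1] at hloop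
  simp only [hloop]
  set c : Int := max 1 (-(PySem.Int.floordiv (-(B.toList.length : Int)) (A.toList.length : Int))) with hcdef
  have hc1 : 1 ≤ c := le_max_left _ _
  have hc0 : pvK A.toList B.toList 0 = c := by
    unfold pvK; rw [hcdef]; norm_num
  have hKlb : ∀ i : Nat, c ≤ pvK A.toList B.toList i := by
    intro i
    rw [← hc0]; exact pvK_mono A.toList B.toList hA (Nat.zero_le i)
  have hKub : ∀ i : Nat, i < A.toList.length → pvK A.toList B.toList i ≤ c + 1 := by
    intro i hi
    rw [pvK_le_iff A.toList B.toList hA i (c + 1) (by omega)]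
    have h0 := (pvK_le_iff A.toList B.toList hA 0 c hc1).mp (le_of_eq hc0)
    have hi' : ((i : Int)) < (A.toList.length : Int) := by exact_mod_cast hi
    push_cast at h0 ⊢
    nlinarith
  rw [← pyRepeat_succ A.toList c (by omega)]
  rcases find_characterization A.toList B.toList A.toList.length with ⟨hF, hnone⟩ | ⟨i, hi, hm, hF, hmin⟩
  · rw [hF]
    have hno1 : ¬ (PySem.Chars.isIn B.toList (PySem.List.pyRepeat A.toList c) = true) := by
      rw [isIn_pyRepeat_iff A.toList B.toList hA c hc1]
      rintro ⟨j, hj, hmj, -⟩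
      rw [hnone j hj] at hmj; exact absurd hmj (by simp)
    have hno2 : ¬ (PySem.Chars.isIn B.toList (PySem.List.pyRepeat A.toList (c + 1)) = true) := by
      rw [isIn_pyRepeat_iff A.toList B.toList hA (c + 1) (by omega)]
      rintro ⟨j, hj, hmj, -⟩
      rw [hnone j hj] at hmj; exact absurd hmj (by simp)
    simp only [Bool.not_eq_true] at hno1 hno2
    rw [hno1, hno2]
    simp
  · rw [hF]
    by_cases hcase : (i : Int) + (B.toList.length : Int) ≤ c * (A.toList.length : Int)
    · have hyes : PySem.Chars.isIn B.toList (PySem.List.pyRepeat A.toList c) = true := by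
        rw [isIn_pyRepeat_iff A.toList B.toList hA c hc1]
        exact ⟨i, hi, hm, hcase⟩
      rw [hyes]
      simp only [if_true]
      have := (pvK_le_iff A.toList B.toList hA i c hc1).mpr hcase
      have := hKlb i
      omega
    · have hKi : pvK A.toList B.toList i = c + 1 := by
        have h2 := hKub i hi
        have h3 : ¬ pvK A.toList B.toList i ≤ c :=
          fun hle => hcase ((pvK_le_iff A.toList B.toList hA i c hc1).mp hle)
        omega
      have hno1 : ¬ (PySem.Chars.isIn B.toList (PySem.List.pyRepeat A.toList c) = true) := by
        rw [isIn_pyRepeat_iff A.toList B.toList hA c hc1]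
        rintro ⟨j, hj, hmj, hjle⟩
        have hij : i ≤ j := by
          by_contra hlt
          rw [hmin j (by omega)] at hmj
          exact absurd hmj (by simp)
        have := pvK_mono A.toList B.toList hA hij
        have := (pvK_le_iff A.toList B.toList hA j c hc1).mpr hjle
        omega
      have hyes2 : PySem.Chars.isIn B.toList (PySem.List.pyRepeat A.toList (c + 1)) = true := by
        rw [isIn_pyRepeat_iff A.toList B.toList hA (c + 1) (by omega)]
        exact ⟨i, hi, hm, (pvK_le_iff A.toList B.toList hA i (c + 1) (by omega)).mp (le_of_eq hKi)⟩
      simp only [Bool.not_eq_true] at hno1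
      rw [hno1, hyes2]
      simp [hKi]
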